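-- pv_equiv track=rewrite | github.com/nomnomeriii/FamilyLawAgent | family_law_agent/safety.py | safety_classifier
-- ===== SOURCE A (Python) =====
-- from typing import Tuple
--
-- RED_FLAGS = [
--     "hide money",
--     "evade",
--     "harass",
--     "threaten",
--     "hurt",
--     "hide assets",
--     "coercion",
--     "violence",
--     "endanger",
-- ]
--
-- def safety_classifier(prompt: str) -> Tuple[bool, str]:
--     """Return (is_safe, message) for a user query."""
--     lowered = (prompt or "").lower()
--     if any(flag in lowered for flag in RED_FLAGS):
--         return (
--             False,
--             "SAFETY ALERT: I cannot provide coaching for hiding assets, evading orders, "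
--             "or harassment. Please seek professional legal aid or emergency resources.",
--         )
--     return True, "Safe"
-- ===== SOURCE B (Python) =====
-- from typing import Tuple
--
-- RED_FLAGS = [
--     "hide money",
--     "evade",
--     "harass",
--     "threaten",
--     "hurt",
--     "hide assets",
--     "coercion",
--     "violence",
--     "endanger",
-- ]
--
-- _ALERT = (
--     "SAFETY ALERT: I cannot provide coaching for hiding assets, evading orders, "
--     "or harassment. Please seek professional legal aid or emergency resources."
-- )
--
-- def safety_classifier(prompt: str) -> Tuple[bool, str]:
--     """Return (is_safe, message) for a user query."""
--     lowered = (prompt or "").lower()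
--     # Position-major single left-to-right sweep: at each position test whether
--     # some red flag starts there, instead of one full substring scan per flag.
--     for i in range(len(lowered) + 1):
--         if any(lowered.startswith(flag, i) for flag in RED_FLAGS):
--             return (False, _ALERT)
--     return (True, "Safe")
-- ===== Notes on version B (the rewrite author's own statement) =====
-- stated objective: alternative
-- what changed: A scans the whole lowered string once per red flag (flag-major any(flag in lowered ...)); B makes one position-major left-to-right sweep, testing at each position whether any flag starts there (startswith), so the string is traversed once.
import Mathlib
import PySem

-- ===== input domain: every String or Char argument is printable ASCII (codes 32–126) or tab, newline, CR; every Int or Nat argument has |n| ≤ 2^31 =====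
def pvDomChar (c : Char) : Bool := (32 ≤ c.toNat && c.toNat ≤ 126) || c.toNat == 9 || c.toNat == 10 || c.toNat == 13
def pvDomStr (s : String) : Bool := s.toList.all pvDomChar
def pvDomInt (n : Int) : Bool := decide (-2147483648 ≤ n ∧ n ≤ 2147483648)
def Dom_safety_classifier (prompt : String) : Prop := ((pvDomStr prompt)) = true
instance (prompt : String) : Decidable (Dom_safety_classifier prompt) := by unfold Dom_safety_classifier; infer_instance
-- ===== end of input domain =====

-- B replaces A's flag-major substring scans (one 'flag in lowered' per red flag) by a single
-- position-major sweep testing at each position whether some flag starts there (alternative, same cost).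


def redFlags : List String :=
  ["hide money", "evade", "harass", "threaten", "hurt",
   "hide assets", "coercion", "violence", "endanger"]

def alertMsg : String :=
  "SAFETY ALERT: I cannot provide coaching for hiding assets, evading orders, or harassment. Please seek professional legal aid or emergency resources."

-- ===== PORT A =====
-- (prompt or "") is prompt itself for a string argument ("" or "" == "")
def safety_classifier (prompt : String) : Bool × String :=
  let lowered := PySem.Str.lower prompt
  if redFlags.any (fun flag => PySem.Str.isIn flag lowered) then
    (false, alertMsg)
  else
    (true, "Safe")

-- ===== PORT B =====
-- red flags as character lists, for the position-major sweep
def redFlagChars : List (List Char) := redFlags.map String.toList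

-- does some red flag start at the current position?
def hitHere (cs : List Char) : Bool := redFlagChars.any (fun f => f.isPrefixOf cs)

-- the sweep over positions 0..n (Python's 'for i in range(len(lowered)+1)')
def sweep : List Char → Bool
  | [] => hitHere []
  | c :: rest => hitHere (c :: rest) || sweep rest

def safety_classifier_alt (prompt : String) : Bool × String :=
  let lowered := PySem.Chars.lower prompt.toList
  if sweep lowered then (false, alertMsg) else (true, "Safe")

-- ===== PRECONDITION & SPEC =====
def Spec_safety_classifier (prompt : String) (out : Bool × String) : Prop := out = safety_classifier_alt prompt
instance (prompt : String) (out : Bool × String) : Decidable (Spec_safety_classifier prompt out) := by unfold Spec_safety_classifier; infer_instance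

-- ===== CLAIM (what is proved, stated in full; the proofs are below) =====
def Claim_equal_safety_classifier : Prop := ∀ (prompt : String), Dom_safety_classifier prompt → Spec_safety_classifier prompt (safety_classifier prompt)

-- ===== LEMMAS AND PROOFS =====

-- the sweep finds exactly the flags that occur as an infix
theorem sweep_iff (cs : List Char) :
    sweep cs = true ↔ ∃ f ∈ redFlagChars, f <:+: cs := by
  induction cs with
  | nil =>
    simp only [sweep, hitHere, List.any_eq_true, List.isPrefixOf_iff_prefix]
    constructor
    · rintro ⟨f, hf, hp⟩; exact ⟨f, hf, hp.isInfix⟩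
    · rintro ⟨f, hf, hi⟩
      have hf0 : f = [] := List.infix_nil.mp hi
      exact ⟨f, hf, hf0 ▸ List.nil_prefix⟩
  | cons c rest ih =>
    simp only [sweep, Bool.or_eq_true, ih, hitHere, List.any_eq_true,
      List.isPrefixOf_iff_prefix]
    constructor
    · rintro (⟨f, hf, hp⟩ | ⟨f, hf, hi⟩)
      · exact ⟨f, hf, hp.isInfix⟩
      · exact ⟨f, hf, List.infix_cons hi⟩
    · rintro ⟨f, hf, hi⟩
      rcases List.infix_cons_iff.mp hi with hp | hi'
      · exact Or.inl ⟨f, hf, hp⟩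
      · exact Or.inr ⟨f, hf, hi'⟩

-- A's condition equals B's condition on the same lowered characters
theorem cond_eq (s : String) :
    redFlags.any (fun flag => PySem.Str.isIn flag (PySem.Str.lower s))
      = sweep (PySem.Chars.lower s.toList) := by
  rcases h : sweep (PySem.Chars.lower s.toList) with _ | _
  · rw [Bool.eq_false_iff]
    intro hc
    rcases List.any_eq_true.mp hc with ⟨f, hf, hin⟩
    have := (PySem.Str.isIn_iff_infix _ _).mp hin
    rw [PySem.Str.toList_lower] at this
    have : sweep (PySem.Chars.lower s.toList) = true :=
      (sweep_iff _).mpr ⟨f.toList, List.mem_map_of_mem hf, this⟩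
    simp [h] at this
  · rcases (sweep_iff _).mp h with ⟨f, hf, hi⟩
    rcases List.mem_map.mp hf with ⟨g, hg, rfl⟩
    refine List.any_eq_true.mpr ⟨g, hg, ?_⟩
    rw [PySem.Str.isIn_iff_infix, PySem.Str.toList_lower]
    exact hi

-- ===== VERDICT (by name: the statement is the Claim_ definition above) =====
theorem safety_classifier_spec : Claim_equal_safety_classifier := by
  intro prompt _
  unfold Spec_safety_classifier safety_classifier safety_classifier_alt
  simp only [cond_eq]
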